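-- pv_equiv track=rewrite | github.com/pypi-data/pypi-mirror-133 | packages/flyermlops/flyermlops-0.0.40.tar.gz/flyermlops-0.0.40/flyermlops/utils.py | split_column_type
-- ===== SOURCE A (Python) =====
-- from typing import Dict, Any, List, Iterable
--
-- def split_column_type(features: Dict[str, str], exclude_cols: Iterable[str] = None):
--     exclude_cols = set(col.lower() for col in (exclude_cols or []))
--     categorical_cols = []
--     numerical_cols = []
--     for k, v in features.items():
--         if k.lower() not in exclude_cols:
--             if v.upper().startswith(("CHAR", "STRING", "VARCHAR")):
--                 categorical_cols.append(k)
--             else: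
--                 numerical_cols.append(k)
--     categorical_cols.sort()
--     numerical_cols.sort()
--
--     return categorical_cols, numerical_cols
-- ===== SOURCE B (Python) =====
-- def split_column_type(features, exclude_cols=None):
--     excluded = {col.lower() for col in (exclude_cols or [])}
--     keys = sorted(k for k in features if k.lower() not in excluded)
--
--     def is_categorical(k):
--         return features[k].upper().startswith(("CHAR", "STRING", "VARCHAR"))
--
--     return [k for k in keys if is_categorical(k)], [k for k in keys if not is_categorical(k)]
-- ===== Notes on version B (the rewrite author's own statement) =====
-- stated objective: alternative
-- what changed: B never builds the two lists in one partitioning loop: it first computes the sorted list of non-excluded keys, then classifies by looking each key's type back up in the dict in two staged comprehension passes, so A's accumulator loop and the two trailing .sort() calls disappear.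
import Mathlib
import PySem

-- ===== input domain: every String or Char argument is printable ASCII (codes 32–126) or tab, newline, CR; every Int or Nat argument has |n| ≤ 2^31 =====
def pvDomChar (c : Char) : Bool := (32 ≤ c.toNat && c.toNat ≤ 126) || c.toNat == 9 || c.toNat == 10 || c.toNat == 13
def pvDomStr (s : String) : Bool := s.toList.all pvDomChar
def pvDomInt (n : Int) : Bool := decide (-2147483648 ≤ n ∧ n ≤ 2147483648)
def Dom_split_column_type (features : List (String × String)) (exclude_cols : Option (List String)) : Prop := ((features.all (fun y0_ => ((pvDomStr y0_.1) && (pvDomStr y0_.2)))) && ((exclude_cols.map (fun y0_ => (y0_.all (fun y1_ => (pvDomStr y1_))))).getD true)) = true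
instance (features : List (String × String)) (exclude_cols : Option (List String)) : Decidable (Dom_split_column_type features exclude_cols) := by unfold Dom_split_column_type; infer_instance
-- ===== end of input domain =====

-- B computes the sorted non-excluded keys once and classifies each key by a dict lookup in
-- two staged passes (alternative decomposition; no partitioning accumulator loop, no trailing sorts).

-- shared helpers (used literally by both Pythons)
-- v.upper().startswith(("CHAR", "STRING", "VARCHAR"))
def pvIsCat (v : String) : Bool :=
  PySem.Str.startswith (PySem.Str.upper v) "CHAR" ||
  PySem.Str.startswith (PySem.Str.upper v) "STRING" ||
  PySem.Str.startswith (PySem.Str.upper v) "VARCHAR"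

-- set(col.lower() for col in (exclude_cols or []))
def pvExcl (exclude_cols : Option (List String)) : PySem.Set String :=
  PySem.Set.ofList ((exclude_cols.getD []).map PySem.Str.lower)

-- ===== PORT A =====
def split_column_type (features : List (String × String)) (exclude_cols : Option (List String)) : List String × List String :=
  let acc := features.foldl (fun (acc : List String × List String) kv =>
      if !(PySem.Set.contains (pvExcl exclude_cols) (PySem.Str.lower kv.1)) then
        if pvIsCat kv.2 then (acc.1 ++ [kv.1], acc.2)
        else (acc.1, acc.2 ++ [kv.1])
      else acc) ([], [])
  (PySem.List.sorted acc.1 (fun x => x) false, PySem.List.sorted acc.2 (fun x => x) false)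

-- ===== PORT B =====
-- keys = sorted(k for k in features if k.lower() not in excluded)
-- then two comprehension passes classifying each key via the dict lookup features[k]
-- (the lookup is total here with default "": every k in keys is a key of the dict, so
-- the default is never read — Python's features[k] cannot raise on these keys)
def split_column_type_alt (features : List (String × String)) (exclude_cols : Option (List String)) : List String × List String :=
  let excluded := pvExcl exclude_cols
  let d := PySem.Dict.ofList features
  let keys := PySem.List.sorted ((features.map Prod.fst).filter
      (fun k => !PySem.Set.contains excluded (PySem.Str.lower k))) (fun x => x) false
  (keys.filter (fun k => pvIsCat (PySem.Dict.getD d k "")),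
   keys.filter (fun k => !pvIsCat (PySem.Dict.getD d k "")))

-- ===== PRECONDITION & SPEC =====
-- Pre_ excludes association lists with duplicate keys: a Python dict cannot contain them,
-- so they represent no input A ever receives (there B's lookup would read the first value
-- for a key while A reads each pair's own value).
def Pre_split_column_type (features : List (String × String)) (exclude_cols : Option (List String)) : Prop :=
  (features.map Prod.fst).Nodup
instance (features : List (String × String)) (exclude_cols : Option (List String)) : Decidable (Pre_split_column_type features exclude_cols) := by unfold Pre_split_column_type; infer_instance

def pvWitness_split_column_type : (List (String × String)) × Option (List String) :=
  ([("b", "VARCHAR(10)"), ("a", "int"), ("C", "string")], some (["A"]))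

def Spec_split_column_type (features : List (String × String)) (exclude_cols : Option (List String)) (out : List String × List String) : Prop := out = split_column_type_alt features exclude_cols
instance (features : List (String × String)) (exclude_cols : Option (List String)) (out : List String × List String) : Decidable (Spec_split_column_type features exclude_cols out) := by unfold Spec_split_column_type; infer_instance

-- ===== CLAIM (what is proved, stated in full; the proofs are below) =====
def Claim_equal_split_column_type : Prop := ∀ (features : List (String × String)) (exclude_cols : Option (List String)), Dom_split_column_type features exclude_cols → Pre_split_column_type features exclude_cols → Spec_split_column_type features exclude_cols (split_column_type features exclude_cols)

-- ===== LEMMAS AND PROOFS =====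

-- A's partitioning fold is filter + map fst on each side
theorem foldKeep_eq (keep : String → Bool) (cat : String → Bool) (xs : List (String × String)) :
    ∀ c n : List String,
    xs.foldl (fun (acc : List String × List String) kv =>
      if keep kv.1 then
        if cat kv.2 then (acc.1 ++ [kv.1], acc.2) else (acc.1, acc.2 ++ [kv.1])
      else acc) (c, n)
    = (c ++ (xs.filter (fun kv => keep kv.1 && cat kv.2)).map Prod.fst,
       n ++ (xs.filter (fun kv => keep kv.1 && !cat kv.2)).map Prod.fst) := by
  induction xs with
  | nil => intro c n; simp
  | cons x t ih =>
    intro c n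
    rw [List.foldl_cons]
    by_cases hk : keep x.1
    · by_cases hc : cat x.2 <;> simp [hk, hc, ih]
    · simp [hk, ih]

-- with nodup keys, ofList leaves the pair list unchanged
theorem items_ofList_nodup (l : List (String × String)) (h : (l.map Prod.fst).Nodup) :
    (PySem.Dict.ofList l).items = l := by
  have := PySem.Dict.items_foldl_insert_fresh (l := l) (k := Prod.fst) (v := Prod.snd)
    (d := PySem.Dict.empty) (by simp) h
  simpa [PySem.Dict.ofList] using this

-- with nodup keys, the lookup features[kv.1] recovers kv.2 for every pair of the list
theorem getD_ofList_of_mem (l : List (String × String)) (h : (l.map Prod.fst).Nodup)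
    (kv : String × String) (hm : kv ∈ l) :
    PySem.Dict.getD (PySem.Dict.ofList l) kv.1 "" = kv.2 := by
  have hit := items_ofList_nodup l h
  apply PySem.Dict.getD_of_mem_items
  · rw [hit]; exact hm
  · simp only [PySem.Dict.keys, hit]; exact h

-- filtering a key-sorted list = sorting the filtered keys
theorem filter_sorted_id (L : List String) (p : String → Bool) :
    (PySem.List.sorted L (fun x => x) false).filter p
      = PySem.List.sorted (L.filter p) (fun x => x) false := by
  symm
  apply PySem.List.sorted_id_eq_of_perm_of_pairwise
  · exact (PySem.List.sorted_perm L (fun x => x) false).filter p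
  · exact (PySem.List.sorted_pairwise L (fun x => x)).sublist List.filter_sublist

-- one side of B equals the corresponding side of A
theorem side_eq (features : List (String × String)) (exclude_cols : Option (List String))
    (h : (features.map Prod.fst).Nodup) (q : String → Bool) :
    ((PySem.List.sorted ((features.map Prod.fst).filter
        (fun k => !PySem.Set.contains (pvExcl exclude_cols) (PySem.Str.lower k))) (fun x => x) false).filter
      (fun k => q (PySem.Dict.getD (PySem.Dict.ofList features) k "")))
    = PySem.List.sorted ((features.filter
        (fun kv => !PySem.Set.contains (pvExcl exclude_cols) (PySem.Str.lower kv.1) && q kv.2)).map Prod.fst)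
        (fun x => x) false := by
  rw [filter_sorted_id, List.filter_filter]
  congr 1
  rw [List.filter_map]
  · congr 1
    apply List.filter_congr
    intro kv hm
    simp only [Function.comp]
    rw [getD_ofList_of_mem features h kv hm]
    exact Bool.and_comm _ _

-- ===== VERDICT (by name: the statement is the Claim_ definition above) =====
theorem split_column_type_spec : Claim_equal_split_column_type := by
  intro features exclude_cols _ hpre
  unfold Spec_split_column_type split_column_type split_column_type_alt
  simp only []
  rw [foldKeep_eq (fun k => !PySem.Set.contains (pvExcl exclude_cols) (PySem.Str.lower k)) pvIsCat]
  simp only [List.nil_append]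
  rw [side_eq features exclude_cols hpre pvIsCat,
      side_eq features exclude_cols hpre (fun v => !pvIsCat v)]
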